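-- pv_equiv track=rewrite | github.com/141048UWM/aplikacje_www | lab02.py | funkcja3
-- ===== SOURCE A (Python) =====
-- def funkcja3(text, letter):
--     c = []
--     h = []
--     for g in text:
--         if letter == g:
--             c.append(letter)
--         else:
--             h.append(g)
--
--     return c, h
-- ===== SOURCE B (Python) =====
-- def funkcja3(text, letter):
--     chars = list(text)
--     return [letter] * chars.count(letter), [g for g in chars if g != letter]
-- ===== Notes on version B (the rewrite author's own statement) =====
-- stated objective: alternative
-- what changed: Replaced A's single interleaved partition loop by two independent passes: the matches list is built directly as [letter] * chars.count(letter) and the rest by one filtering comprehension.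
import Mathlib
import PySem

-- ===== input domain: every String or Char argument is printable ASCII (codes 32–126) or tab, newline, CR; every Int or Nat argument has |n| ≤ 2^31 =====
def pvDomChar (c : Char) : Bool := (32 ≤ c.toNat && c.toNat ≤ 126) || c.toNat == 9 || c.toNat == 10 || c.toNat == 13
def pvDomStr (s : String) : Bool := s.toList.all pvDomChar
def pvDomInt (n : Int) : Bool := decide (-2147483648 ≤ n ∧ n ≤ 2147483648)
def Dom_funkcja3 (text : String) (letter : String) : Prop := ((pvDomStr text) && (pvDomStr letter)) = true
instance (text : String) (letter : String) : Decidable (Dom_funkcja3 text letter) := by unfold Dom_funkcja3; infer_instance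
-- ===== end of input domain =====

-- B replaces A's single interleaved partition loop by two independent passes:
-- [letter] * chars.count(letter) for the matches and one filtering pass for the rest (objective: alternative).

-- ===== PORT A =====
def funkcja3 (text : String) (letter : String) : List String × List String :=
  (text.toList.map (fun c => String.mk [c])).foldl
    (fun ch g => if letter == g then (ch.1 ++ [letter], ch.2) else (ch.1, ch.2 ++ [g]))
    ([], [])

-- ===== PORT B =====
def funkcja3_alt (text : String) (letter : String) : List String × List String :=
  let chars := text.toList.map (fun c => String.mk [c])
  (List.replicate (chars.count letter) letter, chars.filter (fun g => g != letter))

-- ===== PRECONDITION & SPEC =====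
def Spec_funkcja3 (text : String) (letter : String) (out : List String × List String) : Prop := out = funkcja3_alt text letter
instance (text : String) (letter : String) (out : List String × List String) : Decidable (Spec_funkcja3 text letter out) := by unfold Spec_funkcja3; infer_instance

-- ===== CLAIM (what is proved, stated in full; the proofs are below) =====
def Claim_equal_funkcja3 : Prop := ∀ (text : String) (letter : String), Dom_funkcja3 text letter → Spec_funkcja3 text letter (funkcja3 text letter)

-- ===== LEMMAS AND PROOFS =====

-- ===== VERDICT (by name: the statement is the Claim_ definition above) =====
theorem funkcja3_loop (letter : String) (l : List String) (c h : List String) :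
    l.foldl (fun ch g => if letter == g then (ch.1 ++ [letter], ch.2) else (ch.1, ch.2 ++ [g])) (c, h)
      = (c ++ List.replicate (l.count letter) letter, h ++ l.filter (fun g => g != letter)) := by
  induction l generalizing c h with
  | nil => simp
  | cons g t ih =>
      simp only [List.foldl_cons]
      by_cases hg : letter = g
      · subst hg
        rw [if_pos (by simp)]
        rw [ih]
        simp only [List.count_cons_self, List.replicate_succ', List.append_assoc]
        simp [bne]
        rw [← List.replicate_succ, List.replicate_succ']
      · rw [if_neg (by simp [hg])]
        rw [ih]
        have hg' : (g == letter) = false := by simp [Ne.symm hg]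
        simp [List.count_cons, hg', bne]

theorem funkcja3_spec : Claim_equal_funkcja3 := by
  intro text letter _
  unfold Spec_funkcja3 funkcja3 funkcja3_alt
  rw [funkcja3_loop]
  simp
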